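-- pv_equiv track=rewrite | github.com/egidux/feedlark | update_opinion/updater.py | update_topic_counts
-- ===== SOURCE A (Python) =====
-- def update_topic_counts(old_topics, changes, is_positive):
--     """modify the user topic weights to reflect the new data"""
--     diff = 1 if is_positive else -1
--     for change in changes:
--         if change in old_topics:
--             old_topics[change] += diff
--         else:
--             old_topics[change] = diff
--     return old_topics
-- ===== SOURCE B (Python) =====
-- def update_topic_counts(old_topics, changes, is_positive):
--     """modify the user topic weights to reflect the new data"""
--     diff = 1 if is_positive else -1
--     delta = {}
--     for c in changes:
--         delta[c] = delta.get(c, 0) + diff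
--     result = {k: v + delta.get(k, 0) for k, v in old_topics.items()}
--     for c, d in delta.items():
--         if c not in result:
--             result[c] = d
--     return result
-- ===== Notes on version B (the rewrite author's own statement) =====
-- stated objective: alternative
-- what changed: B never updates the user's dict element-by-element: it first folds `changes` into a signed delta table, then rebuilds the result as a dict comprehension over old_topics plus an append pass over the delta table's leftover (new) keys; A instead does one membership-test-and-increment on old_topics per element of changes. B returns a fresh dict instead of mutating old_topics in place.
import Mathlib
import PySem

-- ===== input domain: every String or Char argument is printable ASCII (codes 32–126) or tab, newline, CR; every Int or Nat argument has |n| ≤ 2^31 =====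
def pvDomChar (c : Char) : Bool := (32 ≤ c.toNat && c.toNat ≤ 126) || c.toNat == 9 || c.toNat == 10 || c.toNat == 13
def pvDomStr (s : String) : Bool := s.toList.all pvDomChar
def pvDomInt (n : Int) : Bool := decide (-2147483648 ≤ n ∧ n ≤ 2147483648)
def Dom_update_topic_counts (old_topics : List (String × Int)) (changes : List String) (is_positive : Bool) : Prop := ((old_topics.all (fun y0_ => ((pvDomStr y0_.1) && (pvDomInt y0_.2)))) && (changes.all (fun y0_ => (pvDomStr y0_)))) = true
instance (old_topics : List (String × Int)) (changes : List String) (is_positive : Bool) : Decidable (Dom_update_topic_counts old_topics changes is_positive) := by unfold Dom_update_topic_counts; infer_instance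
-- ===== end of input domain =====

-- B builds a signed delta table from `changes` first, then rebuilds the mapping as a map over
-- old_topics plus an append pass over the delta table's leftover new keys, instead of A's
-- per-element membership-test-and-increment on old_topics (alternative decomposition, same cost).
-- In Python, A mutates and returns the old_topics dict while B returns a fresh dict; the
-- equivalence proved here is about the RETURN value only.


-- ===== PORT A =====
def update_topic_counts (old_topics : List (String × Int)) (changes : List String) (is_positive : Bool) : List (String × Int) :=
  let diff : Int := if is_positive then 1 else -1
  (changes.foldl (fun d change =>
      if d.contains change then d.insert change (d.getD change 0 + diff)
      else d.insert change diff)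
    (PySem.Dict.mk old_topics)).items

-- ===== PORT B =====
def update_topic_counts_alt (old_topics : List (String × Int)) (changes : List String) (is_positive : Bool) : List (String × Int) :=
  let diff : Int := if is_positive then 1 else -1
  let delta : PySem.Dict String Int :=
    changes.foldl (fun d c => d.insert c (d.getD c 0 + diff)) PySem.Dict.empty
  let result : PySem.Dict String Int :=
    PySem.Dict.mk (old_topics.map (fun kv => (kv.1, kv.2 + delta.getD kv.1 0)))
  (delta.items.foldl (fun r p => if r.contains p.1 then r else r.insert p.1 p.2) result).items

-- ===== PRECONDITION & SPEC =====
-- Pre_ excludes only association lists with a duplicate key: such a list does not represent any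
-- Python dict (old_topics is a dict in A), so no input of the Python A is excluded.
def Pre_update_topic_counts (old_topics : List (String × Int)) (changes : List String) (is_positive : Bool) : Prop :=
  (old_topics.map Prod.fst).Nodup
instance (old_topics : List (String × Int)) (changes : List String) (is_positive : Bool) : Decidable (Pre_update_topic_counts old_topics changes is_positive) := by unfold Pre_update_topic_counts; infer_instance

def pvWitness_update_topic_counts : (List (String × Int)) × List String × Bool :=
  ([("news", 2), ("sport", -1)], ["sport", "tech", "sport"], true)

def Spec_update_topic_counts (old_topics : List (String × Int)) (changes : List String) (is_positive : Bool) (out : List (String × Int)) : Prop := out = update_topic_counts_alt old_topics changes is_positive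
instance (old_topics : List (String × Int)) (changes : List String) (is_positive : Bool) (out : List (String × Int)) : Decidable (Spec_update_topic_counts old_topics changes is_positive out) := by unfold Spec_update_topic_counts; infer_instance

-- ===== CLAIM =====
def Claim_equal_update_topic_counts : Prop := ∀ (old_topics : List (String × Int)) (changes : List String) (is_positive : Bool), Dom_update_topic_counts old_topics changes is_positive → Pre_update_topic_counts old_topics changes is_positive → Spec_update_topic_counts old_topics changes is_positive (update_topic_counts old_topics changes is_positive)

-- ===== LEMMAS AND PROOFS =====

def pvNewOf (diff : Int) : List String → List String → List (String × Int)
  | [], _ => []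
  | c :: cs, ks =>
    if ks.contains c then pvNewOf diff cs ks
    else (c, diff * ((cs.count c : Int) + 1)) :: pvNewOf diff cs (ks ++ [c])

theorem pvNewOf_eq (diff : Int) : ∀ (cs ks : List String),
    pvNewOf diff cs ks
      = ((PySem.Set.ofList cs).filter (fun c => !ks.contains c)).map
          (fun c => (c, diff * (cs.count c : Int))) := by
  intro cs
  induction cs with
  | nil => intro ks; rfl
  | cons c cs ih =>
    intro ks
    rw [PySem.Set.ofList_cons, List.filter_cons]
    unfold PySem.Set.discard
    rw [List.filter_filter]
    by_cases hk : ks.contains c = true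
    · simp only [pvNewOf, hk, if_true, Bool.not_true, Bool.false_eq_true, if_false]
      rw [ih ks]
      have hfil : (PySem.Set.ofList cs).filter (fun y => !ks.contains y && !(y == c))
          = (PySem.Set.ofList cs).filter (fun y => !ks.contains y) := by
        apply List.filter_congr
        intro y _
        by_cases hy : y = c
        · subst hy; rw [hk]; simp
        · simp [hy]
      rw [hfil]
      apply List.map_congr_left
      intro y hy
      have hyk : ks.contains y = false := by
        have := List.of_mem_filter hy
        simpa using this
      have hyc : ¬(c = y) := by
        intro he; subst he; rw [hk] at hyk; exact absurd hyk (by simp)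
      simp [hyc]
    · have hk' : ks.contains c = false := by simpa using hk
      simp only [pvNewOf, hk', Bool.false_eq_true, if_false, Bool.not_false, if_true]
      rw [ih (ks ++ [c])]
      congr 1
      · simp
      · have hfil : (PySem.Set.ofList cs).filter (fun y => !(ks ++ [c]).contains y)
            = (PySem.Set.ofList cs).filter (fun y => !ks.contains y && !(y == c)) := by
          apply List.filter_congr
          intro y _
          by_cases hyc : y = c <;> simp [hyc, Bool.and_comm]
        rw [hfil]
        apply List.map_congr_left
        intro y hy
        have hyc : ¬(c = y) := by
          have := List.of_mem_filter hy
          simp at this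
          exact fun he => this.2 he.symm
        simp [hyc]

theorem pvA_items (diff : Int) : ∀ (cs : List String) (d : PySem.Dict String Int), d.keys.Nodup →
    (cs.foldl (fun d change =>
        if d.contains change then d.insert change (d.getD change 0 + diff)
        else d.insert change diff) d).items
      = d.items.map (fun kv => (kv.1, kv.2 + diff * (cs.count kv.1 : Int))) ++ pvNewOf diff cs d.keys := by
  intro cs
  induction cs with
  | nil =>
    intro d _
    simp [pvNewOf]
  | cons c cs ih =>
    intro d hnd
    rw [List.foldl_cons]
    by_cases hc : d.contains c = true
    · simp only [hc, if_true]
      rw [ih _ (PySem.Dict.nodup_keys_insert _ _ _ hnd)]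
      rw [PySem.Dict.keys_insert_of_contains _ _ hc,
        PySem.Dict.items_insert_of_contains _ _ hc, List.map_map]
      have hmc : c ∈ d.keys := (PySem.Dict.contains_iff_mem_keys d c).mp hc
      have hnew : pvNewOf diff (c :: cs) d.keys = pvNewOf diff cs d.keys := by
        simp [pvNewOf, hmc]
      rw [hnew]
      congr 1
      apply List.map_congr_left
      intro p hp
      by_cases hpc : p.1 = c
      · have hmem : (c, p.2) ∈ d.items := by rw [← hpc]; simpa using hp
        have hget : d.getD c 0 = p.2 := PySem.Dict.getD_of_mem_items d hmem hnd 0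
        simp only [Function.comp_apply, hpc, beq_self_eq_true, if_true]
        simp [hget]
        ring
      · simp only [Function.comp_apply]
        have : (p.1 == c) = false := by simpa using hpc
        simp [this, Ne.symm hpc]
    · have hc' : d.contains c = false := by simpa using hc
      simp only [hc', Bool.false_eq_true, if_false]
      rw [ih _ (PySem.Dict.nodup_keys_insert _ _ _ hnd)]
      rw [PySem.Dict.keys_insert_of_not_contains _ _ hc',
        PySem.Dict.items_insert_of_not_contains _ _ hc', List.map_append]
      have hmc : ¬ c ∈ d.keys := fun hm => by
        rw [(PySem.Dict.contains_iff_mem_keys d c).mpr hm] at hc'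
        exact absurd hc' (by simp)
      have hnew : pvNewOf diff (c :: cs) d.keys
          = (c, diff * ((cs.count c : Int) + 1)) :: pvNewOf diff cs (d.keys ++ [c]) := by
        simp [pvNewOf, hmc]
      rw [hnew]
      have hmap : d.items.map (fun kv => (kv.1, kv.2 + diff * (cs.count kv.1 : Int)))
          = d.items.map (fun kv => (kv.1, kv.2 + diff * ((c :: cs).count kv.1 : Int))) := by
        apply List.map_congr_left
        intro p hp
        have hpc : ¬(c = p.1) := by
          intro he
          have : p.1 ∈ d.keys := List.mem_map_of_mem hp
          rw [← he] at this
          rw [(PySem.Dict.contains_iff_mem_keys d c).mpr this] at hc'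
          exact absurd hc' (by simp)
        simp [hpc]
      rw [hmap]
      simp [List.count_cons]
      ring

theorem pvDeltaGetD (diff : Int) : ∀ (cs : List String) (d : PySem.Dict String Int) (c : String),
    (cs.foldl (fun d c => d.insert c (d.getD c 0 + diff)) d).getD c 0
      = d.getD c 0 + diff * (cs.count c : Int) := by
  intro cs
  induction cs with
  | nil => intro d c; simp
  | cons c' cs ih =>
    intro d c
    rw [List.foldl_cons, ih, PySem.Dict.getD_insert, List.count_cons]
    by_cases h : c = c'
    · subst h; simp; ring
    · simp [h, Ne.symm h]

theorem pvAppendFold : ∀ (L : List (String × Int)) (r : PySem.Dict String Int),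
    (L.map Prod.fst).Nodup →
    (L.foldl (fun r p => if r.contains p.1 then r else r.insert p.1 p.2) r).items
      = r.items ++ L.filter (fun p => !r.contains p.1) := by
  intro L
  induction L with
  | nil => intro r _; simp
  | cons p L ih =>
    intro r hnd
    have hndL : (L.map Prod.fst).Nodup := (List.nodup_cons.mp (by simpa using hnd)).2
    have hp1 : p.1 ∉ L.map Prod.fst := (List.nodup_cons.mp (by simpa using hnd)).1
    rw [List.foldl_cons]
    by_cases hr : r.contains p.1 = true
    · simp only [hr, if_true]
      rw [ih r hndL, List.filter_cons]
      simp [hr]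
    · have hr' : r.contains p.1 = false := by simpa using hr
      simp only [hr', Bool.false_eq_true, if_false]
      rw [ih _ hndL, PySem.Dict.items_insert_of_not_contains _ _ hr', List.filter_cons]
      have hfil : L.filter (fun q => !(r.insert p.1 p.2).contains q.1)
          = L.filter (fun q => !r.contains q.1) := by
        apply List.filter_congr
        intro q hq
        have hne : q.1 ≠ p.1 := fun he => hp1 (he ▸ List.mem_map_of_mem hq)
        rw [PySem.Dict.contains_insert]
        simp [hne]
      rw [hfil]
      simp [hr']

theorem pvB_items (diff : Int) (ots : List (String × Int)) (cs : List String) :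
    (let delta : PySem.Dict String Int :=
       cs.foldl (fun d c => d.insert c (d.getD c 0 + diff)) PySem.Dict.empty
     let result : PySem.Dict String Int :=
       PySem.Dict.mk (ots.map (fun kv => (kv.1, kv.2 + delta.getD kv.1 0)))
     (delta.items.foldl (fun r p => if r.contains p.1 then r else r.insert p.1 p.2) result).items)
      = ots.map (fun kv => (kv.1, kv.2 + diff * (cs.count kv.1 : Int)))
        ++ ((PySem.Set.ofList cs).filter (fun c => !(ots.map Prod.fst).contains c)).map
             (fun c => (c, diff * (cs.count c : Int))) := by
  set delta : PySem.Dict String Int :=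
    cs.foldl (fun d c => d.insert c (d.getD c 0 + diff)) PySem.Dict.empty with hdelta
  set r0 : PySem.Dict String Int :=
    PySem.Dict.mk (ots.map (fun kv => (kv.1, kv.2 + delta.getD kv.1 0))) with hr0
  have hdgetD : ∀ c, delta.getD c 0 = diff * (cs.count c : Int) := by
    intro c
    rw [hdelta, pvDeltaGetD]
    simp
  have hdkeys : delta.keys = PySem.Set.ofList cs := by
    rw [hdelta, PySem.Dict.keys_foldl_insert cs (fun d x => d.getD x 0 + diff) PySem.Dict.empty]
    rw [PySem.Dict.keys_empty, PySem.Set.update_nil_left]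
  have hdnod : delta.keys.Nodup := by rw [hdkeys]; exact PySem.Set.nodup_ofList cs
  have hitems : delta.items
      = (PySem.Set.ofList cs).map (fun k => (k, diff * (cs.count k : Int))) := by
    rw [PySem.Dict.items_eq_map_keys delta hdnod 0, hdkeys]
    apply List.map_congr_left
    intro k _
    rw [hdgetD]
  have hr0keys : r0.keys = ots.map Prod.fst := by
    rw [hr0]
    simp [PySem.Dict.keys, List.map_map]
  have hr0cont : ∀ c, r0.contains c = (ots.map Prod.fst).contains c := by
    intro c
    rw [PySem.Dict.contains_eq_decide_mem_keys, hr0keys]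
    simp
  rw [pvAppendFold delta.items r0 (by simpa [PySem.Dict.keys] using hdnod)]
  congr 1
  · show ots.map (fun kv => (kv.1, kv.2 + delta.getD kv.1 0)) = _
    apply List.map_congr_left
    intro kv _
    rw [hdgetD]
  · rw [hitems, List.filter_map]
    congr 1
    apply List.filter_congr
    intro k _
    simp only [Function.comp_apply]
    rw [hr0cont]

-- ===== VERDICT =====
theorem update_topic_counts_spec : Claim_equal_update_topic_counts := by
  intro ots cs pos _ hpre
  show update_topic_counts ots cs pos = update_topic_counts_alt ots cs pos
  have hA := pvA_items (if pos then (1 : Int) else -1) cs (PySem.Dict.mk ots)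
    (by simpa [PySem.Dict.keys] using hpre)
  have hB := pvB_items (if pos then (1 : Int) else -1) ots cs
  refine Eq.trans (Eq.trans hA ?_) hB.symm
  rw [pvNewOf_eq]
  rfl
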